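-- pv_equiv track=rewrite | github.com/woshiliyuan/learnPython | leetCode/random/_18removeDuplicateLetters.py | removeDuplicateLetters4
-- ===== SOURCE A (Python) =====
-- def removeDuplicateLetters4(s: str) -> str:
--     """
--     借鉴官方栈思想 && 网友removeDuplicateLetters3代码，自己重新写一遍
--     非栈数据结构
--     :param s:
--     :return:
--     """
--     result = ""
--     for i in range(len(s)):
--         ch = s[i]
--         # s.index, s.rindex找不到会报错，得用find, rfind
--         # 如果已经包含了则跳过，没有则添加
--         if result.find(ch) == -1:
--             # 1. 倒序遍历暂时已经保存了的字符; 倒序range一定要传三哥参数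
--             for j in range(len(result) - 1,-1,-1):
--                 temp_ch = result[j]
--                 # 1.1 如果temp_ch比新字符小 && 后面还会出现，则划掉它
--                 if temp_ch > ch and s[i:].find(temp_ch) > -1:
--                     result = result[:-1]
--                 # 1.2 比较有意思的地方：不应该倒序遍历完所有，只要有一个比新字符靠前||后面不出现了，就应该break
--                 else:
--                     break
--             # 2. 清理完前面字符了，新字符逃不掉的，还是要添加的
--             result += ch
--     return result
-- ===== SOURCE B (Python) =====
-- def removeDuplicateLetters4(s: str) -> str:
--     # Recursive selection (no stack): pick the smallest character whose suffix
--     # still contains every remaining distinct character, emit it, drop its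
--     # other occurrences from the remainder, and recurse on what is left.
--     if not s:
--         return ""
--     cnt = {}
--     for ch in s:
--         cnt[ch] = cnt.get(ch, 0) + 1
--     pos = 0
--     for i, ch in enumerate(s):
--         if ch < s[pos]:
--             pos = i
--         cnt[ch] -= 1
--         if cnt[ch] == 0:
--             break
--     rest = ''.join(ch for ch in s[pos + 1:] if ch != s[pos])
--     return s[pos] + removeDuplicateLetters4(rest)
-- ===== Notes on version B (the rewrite author's own statement) =====
-- stated objective: alternative
-- what changed: Replaced A's single greedy pass that maintains the partial result string and repeatedly re-scans it and the sliced suffix s[i:] with str.find, by a recursive selection algorithm: count all characters once, scan only up to the first position whose character has no later occurrence to pick the smallest emittable character, emit it, filter it out of the remainder and recurse.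
import Mathlib
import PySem

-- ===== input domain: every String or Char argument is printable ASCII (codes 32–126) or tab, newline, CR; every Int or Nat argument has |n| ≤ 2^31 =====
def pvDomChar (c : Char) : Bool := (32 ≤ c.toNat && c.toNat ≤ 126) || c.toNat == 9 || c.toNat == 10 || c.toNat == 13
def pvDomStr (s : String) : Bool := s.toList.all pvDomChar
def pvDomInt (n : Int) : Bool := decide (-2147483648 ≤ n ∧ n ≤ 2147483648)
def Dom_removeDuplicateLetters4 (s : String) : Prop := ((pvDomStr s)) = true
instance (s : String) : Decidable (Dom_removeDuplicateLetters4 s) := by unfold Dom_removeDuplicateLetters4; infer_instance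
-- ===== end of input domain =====

-- B replaces A's greedy result-rescanning pass by a recursive selection algorithm
-- (count once, pick the smallest emittable character, filter, recurse); equal return values proved.

-- ===== PORT A =====
-- A's inner 'for j in range(len(result)-1,-1,-1)' with break: recursion over the j-list.
def pvAInner (js : List Int) (res : List Char) (ch : Char) (sfx : List Char) : List Char :=
  match js with
  | [] => res
  | j :: rest =>
    let temp := PySem.List.pyGetD res j ' '      -- temp_ch = result[j] (always in range)
    if ch < temp ∧ PySem.Chars.find sfx [temp] > -1 then
      pvAInner rest (PySem.List.slice res none (some (-1))) ch sfx   -- result = result[:-1]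
    else res                                      -- break

def pvAStep (cs : List Char) (res : List Char) (i : Int) : List Char :=
  let ch := PySem.List.pyGetD cs i ' '            -- ch = s[i] (i always in range)
  if PySem.Chars.find res [ch] = -1 then
    pvAInner (PySem.List.pyRange ((res.length : Int) - 1) (-1) (-1)) res ch
        (PySem.List.slice cs (some i) none) ++ [ch]   -- result += ch
  else res

def removeDuplicateLetters4 (s : String) : String :=
  String.mk ((PySem.List.pyRange 0 (s.toList.length : Int) 1).foldl (pvAStep s.toList) [])

-- ===== PORT B =====
-- Source B builds the counter by hand: cnt[ch] = cnt.get(ch, 0) + 1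
def pvCount (cs : List Char) : PySem.Dict Char Int :=
  cs.foldl (fun d ch => d.insert ch (d.getD ch 0 + 1)) PySem.Dict.empty

-- Source B's 'for i, ch in enumerate(s)' loop with its break; returns the final pos
def pvSelLoop (cs : List Char) : List (Int × Char) → PySem.Dict Char Int → Int → Int
  | [], _, pos => pos
  | (i, ch) :: rest, cnt, pos =>
    let pos' := if ch < PySem.List.pyGetD cs pos ' ' then i else pos   -- if ch < s[pos]: pos = i
    let cnt' := cnt.modify ch 0 (· - 1)                                -- cnt[ch] -= 1
    if cnt'.getD ch 0 = 0 then pos' else pvSelLoop cs rest cnt' pos'   -- if cnt[ch] == 0: break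

-- the loop never moves pos below 0 (cited by pvSel's decreasing_by)
lemma pvSelLoop_nonneg (cs : List Char) (prs : List (Int × Char)) (cnt : PySem.Dict Char Int)
    (pos : Int) (h1 : ∀ p ∈ prs, 0 ≤ p.1) (h2 : 0 ≤ pos) :
    0 ≤ pvSelLoop cs prs cnt pos := by
  induction prs generalizing cnt pos with
  | nil => simpa [pvSelLoop] using h2
  | cons p rest ih =>
    obtain ⟨i, ch⟩ := p
    have hi : 0 ≤ i := h1 (i, ch) (by simp)
    have hpos' : 0 ≤ (if ch < PySem.List.pyGetD cs pos ' ' then i else pos) := by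
      split <;> omega
    simp only [pvSelLoop]
    split
    · exact hpos'
    · exact ih _ _ (fun p hp => h1 p (by simp [hp])) hpos'

def pvSelPos (cs : List Char) : Int :=
  pvSelLoop cs (PySem.List.enumerate cs) (pvCount cs) 0

lemma pvSelPos_nonneg (cs : List Char) : 0 ≤ pvSelPos cs := by
  refine pvSelLoop_nonneg _ _ _ _ (fun p hp => ?_) le_rfl
  obtain ⟨k, hk, rfl⟩ := (PySem.List.mem_enumerate_iff _ _ _).mp hp
  simp

def pvSel (cs : List Char) : List Char :=
  if hcs : cs = [] then []
  else
    let pos := pvSelPos cs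
    let c := PySem.List.pyGetD cs pos ' '          -- s[pos] (pos is always in range)
    -- rest = ''.join(ch for ch in s[pos + 1:] if ch != s[pos])
    let rest := (PySem.List.slice cs (some (pos + 1)) none).filter (fun ch => ch ≠ c)
    c :: pvSel rest
termination_by cs.length
decreasing_by
  have hp : 0 ≤ pvSelPos cs := pvSelPos_nonneg cs
  have h1 := List.length_filter_le
    (fun ch => decide (ch ≠ PySem.List.pyGetD cs (pvSelPos cs) ' '))
    (PySem.List.slice cs (some (pvSelPos cs + 1)))
  rw [PySem.List.slice_from] at h1 ⊢
  simp only [List.length_drop] at h1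
  have h5 : 0 < cs.length := List.length_pos_iff.mpr hcs
  all_goals omega

def removeDuplicateLetters4_alt (s : String) : String :=
  String.mk (pvSel s.toList)

-- ===== PRECONDITION & SPEC =====
def Spec_removeDuplicateLetters4 (s : String) (out : String) : Prop := out = removeDuplicateLetters4_alt s
instance (s : String) (out : String) : Decidable (Spec_removeDuplicateLetters4 s out) := by unfold Spec_removeDuplicateLetters4; infer_instance

-- ===== CLAIM (what is proved, stated in full; the proofs are below) =====
def Claim_equal_removeDuplicateLetters4 : Prop := ∀ (s : String), Dom_removeDuplicateLetters4 s → Spec_removeDuplicateLetters4 s (removeDuplicateLetters4 s)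

-- ===== LEMMAS AND PROOFS =====

-- Abstract greedy machine both ports are reduced to: stack held top-first,
-- pop while the top is greater than the incoming char and still occurs later.
def pvPop (c : Char) (rest : List Char) : List Char → List Char
  | [] => []
  | t :: stk => if c < t ∧ t ∈ rest then pvPop c rest stk else t :: stk

def pvG : List Char → List Char → List Char
  | stk, [] => stk
  | stk, c :: rest => if c ∈ stk then pvG stk rest else pvG (c :: pvPop c rest stk) rest

-- guard invariant: whenever a char d < c still followed by another c comes up,
-- some unpoppable char (never occurring again) is already on the stack or due before d
def pvInv (c : Char) (g rem : List Char) : Prop :=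
  ∀ r1 d r2, rem = r1 ++ d :: r2 → d < c → c ∈ r2 →
    ∃ e', e' ≠ c ∧ (e' ∈ g ∨ e' ∈ r1) ∧ e' ∉ d :: r2

lemma pvSingleton_infix_iff (c : Char) (l : List Char) : [c] <:+: l ↔ c ∈ l := by
  constructor
  · intro h; exact List.singleton_sublist.mp h.sublist
  · intro h
    obtain ⟨l1, l2, rfl⟩ := List.append_of_mem h
    exact ⟨l1, l2, by simp⟩

lemma pvPop_subset (c : Char) (rest : List Char) :
    ∀ stk x, x ∈ pvPop c rest stk → x ∈ stk := by
  intro stk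
  induction stk with
  | nil => simp [pvPop]
  | cons t stk ih =>
    intro x hx
    simp only [pvPop] at hx
    split at hx
    · exact List.mem_cons_of_mem _ (ih x hx)
    · exact hx

lemma pvPop_all (c : Char) (rest : List Char) :
    ∀ stk, (∀ x ∈ stk, c < x ∧ x ∈ rest) → pvPop c rest stk = [] := by
  intro stk
  induction stk with
  | nil => simp [pvPop]
  | cons t stk ih =>
    intro h
    simp only [pvPop]
    rw [if_pos (h t (by simp))]
    exact ih (fun x hx => h x (by simp [hx]))

lemma pvPop_mem_of_not (c : Char) (rest : List Char) :
    ∀ stk x, x ∈ stk → ¬ (c < x ∧ x ∈ rest) → x ∈ pvPop c rest stk := by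
  intro stk
  induction stk with
  | nil => simp
  | cons t stk ih =>
    intro x hx hnc
    simp only [pvPop]
    split
    · rename_i hc
      rcases List.mem_cons.mp hx with rfl | hx'
      · exact absurd hc hnc
      · exact ih x hx' hnc
    · exact hx

-- pop through the pinned bottom [c]: never reached thanks to the guard
lemma pvPop_append (c h : Char) (rem' : List Char) :
    ∀ g, c ∉ g → (h < c → c ∈ rem' → ∃ e' ∈ g, e' ≠ c ∧ e' ∉ rem') →
    pvPop h rem' (g ++ [c]) = pvPop h (rem'.filter (· ≠ c)) g ++ [c] := by
  intro g
  induction g with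
  | nil =>
    intro _ hguard
    have hnc : ¬ (h < c ∧ c ∈ rem') := by
      rintro ⟨hx1, hx2⟩
      obtain ⟨e', he', _⟩ := hguard hx1 hx2
      simp at he'
    simp [pvPop, hnc]
  | cons t g ih =>
    intro hc hguard
    have htc : t ≠ c := fun h => hc (h ▸ List.mem_cons_self)
    have hcg : c ∉ g := fun h => hc (List.mem_cons_of_mem _ h)
    have hcond : (h < t ∧ t ∈ rem'.filter (· ≠ c)) ↔ (h < t ∧ t ∈ rem') := by
      simp [List.mem_filter, htc]
    simp only [List.cons_append, pvPop]
    by_cases hc1 : h < t ∧ t ∈ rem'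
    · rw [if_pos hc1, if_pos (hcond.mpr hc1)]
      refine ih hcg (fun hh1 hh2 => ?_)
      obtain ⟨e', he1, he2, he3⟩ := hguard hh1 hh2
      rcases List.mem_cons.mp he1 with rfl | he1'
      · exact absurd hc1.2 he3
      · exact ⟨e', he1', he2, he3⟩
    · rw [if_neg hc1, if_neg (fun hx => hc1 (hcond.mp hx))]
      simp

lemma pvInv_step (c : Char) (g g' : List Char) (h : Char) (rem' : List Char)
    (hinv : pvInv c g (h :: rem'))
    (hkeep : ∀ x, x ∈ g → x ∉ rem' → x ∈ g')
    (hh : h ≠ c → h ∈ g') : pvInv c g' rem' := by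
  intro r1 d r2 hsplit hd hc
  obtain ⟨e', he1, he2, he3⟩ := hinv (h :: r1) d r2 (by simp [hsplit]) hd hc
  rcases he2 with he2 | he2
  · by_cases hr1 : e' ∈ r1
    · exact ⟨e', he1, Or.inr hr1, he3⟩
    · have : e' ∉ rem' := by
        rw [hsplit]
        simp only [List.mem_append]
        rintro (h1 | h1)
        · exact hr1 h1
        · exact he3 h1
      exact ⟨e', he1, Or.inl (hkeep e' he2 this), he3⟩
  · rcases List.mem_cons.mp he2 with rfl | he2'
    · exact ⟨e', he1, Or.inl (hh he1), he3⟩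
    · exact ⟨e', he1, Or.inr he2', he3⟩

lemma pvG_phase2 (c : Char) :
    ∀ rem g, c ∉ g → pvInv c g rem →
      pvG (g ++ [c]) rem = pvG g (rem.filter (· ≠ c)) ++ [c] := by
  intro rem
  induction rem with
  | nil => intro g _ _; simp [pvG]
  | cons h rem' ih =>
    intro g hcg hinv
    by_cases hhc : h = c
    · subst hhc
      have hmem : h ∈ g ++ [h] := by simp
      have hfilter : (h :: rem').filter (· ≠ h) = rem'.filter (· ≠ h) := by simp
      rw [hfilter]
      simp only [pvG]
      rw [if_pos hmem]
      exact ih g hcg (pvInv_step _ _ _ _ _ hinv (fun x hx _ => hx) (fun hne => absurd rfl hne))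
    · have hfilter : (h :: rem').filter (· ≠ c) = h :: rem'.filter (· ≠ c) := by simp [hhc]
      rw [hfilter]
      by_cases hmem : h ∈ g
      · have hmem' : h ∈ g ++ [c] := by simp [hmem]
        simp only [pvG]
        rw [if_pos hmem', if_pos hmem]
        exact ih g hcg (pvInv_step _ _ _ _ _ hinv (fun x hx _ => hx) (fun _ => hmem))
      · have hmem' : h ∉ g ++ [c] := by simp [hmem, hhc]
        simp only [pvG]
        rw [if_neg hmem', if_neg hmem]
        have hguard : h < c → c ∈ rem' → ∃ e' ∈ g, e' ≠ c ∧ e' ∉ rem' := by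
          intro h1 h2
          obtain ⟨e', he1, he2, he3⟩ := hinv [] h rem' (by simp) h1 h2
          rcases he2 with he2 | he2
          · exact ⟨e', he2, he1, fun hx => he3 (List.mem_cons_of_mem _ hx)⟩
          · simp at he2
        rw [pvPop_append c h rem' g hcg hguard]
        have heq : h :: (pvPop h (rem'.filter (· ≠ c)) g ++ [c])
            = (h :: pvPop h (rem'.filter (· ≠ c)) g) ++ [c] := by simp
        rw [heq]
        refine ih _ ?_ ?_
        · intro hx
          rcases List.mem_cons.mp hx with h1 | h1
          · exact hhc h1.symm
          · exact hcg (pvPop_subset _ _ _ _ h1)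
        · refine pvInv_step _ _ _ _ _ hinv (fun x hx hnx => ?_) (fun _ => List.mem_cons_self)
          refine List.mem_cons_of_mem _ (pvPop_mem_of_not _ _ _ _ hx ?_)
          rintro ⟨_, hxf⟩
          exact hnx (List.mem_filter.mp hxf).1

lemma pvG_phase1 (c : Char) (u : List Char) :
    ∀ p stk, (∀ x ∈ p, c < x ∧ x ∈ u) → (∀ x ∈ stk, c < x ∧ x ∈ u) →
      pvG stk (p ++ c :: u) = pvG [c] u := by
  intro p
  induction p with
  | nil =>
    intro stk _ hstk
    simp only [List.nil_append, pvG]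
    rw [if_neg (fun hx => lt_irrefl c (hstk c hx).1), pvPop_all c u stk hstk]
  | cons h p' ih =>
    intro stk hp hstk
    simp only [List.cons_append, pvG]
    by_cases hmem : h ∈ stk
    · rw [if_pos hmem]
      exact ih stk (fun x hx => hp x (by simp [hx])) hstk
    · rw [if_neg hmem]
      refine ih _ (fun x hx => hp x (by simp [hx])) (fun x hx => ?_)
      rcases List.mem_cons.mp hx with rfl | h1
      · exact hp x (by simp)
      · exact hstk x (pvPop_subset _ _ _ _ h1)

lemma pvG_select (c : Char) (p u : List Char)
    (h1 : ∀ x ∈ p, c < x ∧ x ∈ u) (h3 : pvInv c [] u) :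
    pvG [] (p ++ c :: u) = pvG [] (u.filter (· ≠ c)) ++ [c] := by
  have h2 := pvG_phase2 c u [] (by simp) h3
  rw [pvG_phase1 c u p [] h1 (by simp)]
  simpa using h2

-- ===== A-side bridge: port A equals (pvG [] cs).reverse =====

lemma pvAinner_eq (cs : List Char) (a : Nat) (c : Char)
    (hc : cs.drop a = c :: cs.drop (a + 1)) :
    ∀ stk, pvAInner (PySem.List.pyRange ((stk.reverse.length : Int) - 1) (-1) (-1))
        stk.reverse c (cs.drop a) = (pvPop c (cs.drop (a + 1)) stk).reverse := by
  intro stk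
  induction stk with
  | nil =>
    rw [show ((([] : List Char).reverse.length : Int) - 1) = -1 by simp,
      PySem.List.pyRange_neg_one_eq_nil (by omega)]
    simp [pvAInner, pvPop]
  | cons t rest ih =>
    have hlen : (((t :: rest).reverse.length : Int) - 1) = (rest.length : Int) := by simp
    rw [hlen, PySem.List.pyRange_neg_one_cons (by omega)]
    have htemp : PySem.List.pyGetD ((t :: rest).reverse) ((rest.length : Int)) ' ' = t := by
      rw [PySem.List.pyGetD_natCast]
      simp [List.getD]
    have hfind : (PySem.Chars.find (cs.drop a) [t] > -1) ↔ t ∈ cs.drop a := by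
      constructor
      · intro h
        exact (pvSingleton_infix_iff t _).mp
          ((PySem.Chars.find_nonneg_iff (cs.drop a) [t]).mp (by omega))
      · intro h
        have := (PySem.Chars.find_nonneg_iff (cs.drop a) [t]).mpr
          ((pvSingleton_infix_iff t _).mpr h)
        omega
    by_cases hcond : c < t ∧ t ∈ cs.drop (a + 1)
    · have hA : c < t ∧ PySem.Chars.find (cs.drop a) [t] > -1 :=
        ⟨hcond.1, hfind.mpr (by rw [hc]; exact List.mem_cons_of_mem _ hcond.2)⟩
      have hdrop : PySem.List.slice ((t :: rest).reverse) none (some (-1)) = rest.reverse := by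
        rw [PySem.List.slice_to_neg_one]; simp
      simp only [pvAInner, htemp]
      rw [if_pos hA, hdrop]
      simp only [pvPop]
      rw [if_pos hcond]
      simpa using ih
    · have hA : ¬ (c < t ∧ PySem.Chars.find (cs.drop a) [t] > -1) := by
        rintro ⟨hx1, hx2⟩
        refine hcond ⟨hx1, ?_⟩
        have ht : t ∈ cs.drop a := hfind.mp hx2
        rw [hc] at ht
        rcases List.mem_cons.mp ht with rfl | h1
        · exact absurd hx1 (lt_irrefl t)
        · exact h1
      simp only [pvAInner, htemp]
      rw [if_neg hA]
      simp only [pvPop]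
      rw [if_neg hcond]

lemma pvAmain (cs : List Char) :
    ∀ (tl : List Char) (a : Nat), tl = cs.drop a → ∀ stk : List Char,
      (PySem.List.pyRange (a : Int) (cs.length : Int) 1).foldl (pvAStep cs) stk.reverse
        = (pvG stk tl).reverse := by
  intro tl
  induction tl with
  | nil =>
    intro a h stk
    have hlen : cs.length ≤ a := by
      have h2 := congrArg List.length h
      simp [List.length_drop] at h2
      omega
    rw [PySem.List.pyRange_one_eq_nil (by exact_mod_cast hlen)]
    simp [pvG]
  | cons c tl' ih =>
    intro a h stk
    have hlt : a < cs.length := by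
      have h2 := congrArg List.length h
      simp [List.length_drop] at h2
      omega
    have htl' : tl' = cs.drop (a + 1) := by rw [← List.tail_drop, ← h]; rfl
    have hc : cs.drop a = c :: cs.drop (a + 1) := by rw [← h, htl']
    have hch : PySem.List.pyGetD cs (a : Int) ' ' = c := by
      rw [PySem.List.pyGetD_natCast]
      have hget : cs[a]? = some c := by
        have h0 : (cs.drop a)[0]? = some c := by rw [hc]; rfl
        simpa using h0
      simp [List.getD, hget]
    rw [PySem.List.pyRange_one_cons (by exact_mod_cast hlt)]
    simp only [List.foldl_cons]
    have hcast : (a : Int) + 1 = ((a + 1 : Nat) : Int) := by push_cast; ring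
    by_cases hmem : c ∈ stk
    · have hA : ¬ (PySem.Chars.find stk.reverse [c] = -1) := by
        rw [PySem.Chars.find_eq_neg_one_iff, pvSingleton_infix_iff]
        simp [hmem]
      have hstepA : pvAStep cs stk.reverse ((a : Int)) = stk.reverse := by
        simp only [pvAStep, hch]
        rw [if_neg hA]
      have hG : pvG stk (c :: tl') = pvG stk tl' := by
        simp only [pvG]
        rw [if_pos hmem]
      rw [hstepA, hcast, hG]
      exact ih (a + 1) htl' stk
    · have hA : PySem.Chars.find stk.reverse [c] = -1 := by
        rw [PySem.Chars.find_eq_neg_one_iff, pvSingleton_infix_iff]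
        simp [hmem]
      have hstepA : pvAStep cs stk.reverse ((a : Int))
          = (pvPop c (cs.drop (a + 1)) stk).reverse ++ [c] := by
        simp only [pvAStep, hch]
        rw [if_pos hA, PySem.List.slice_from_natCast, pvAinner_eq cs a c hc stk]
      have hG : pvG stk (c :: tl') = pvG (c :: pvPop c tl' stk) tl' := by
        simp only [pvG]
        rw [if_neg hmem]
      rw [hstepA, hcast, hG, ← htl']
      have hrev : (pvPop c tl' stk).reverse ++ [c] = (c :: pvPop c tl' stk).reverse := by simp
      rw [htl'] at hrev ⊢
      rw [hrev, ← htl']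
      exact ih (a + 1) htl' (c :: pvPop c tl' stk)

-- ===== B-side bridge: pvSel equals (pvG [] cs).reverse =====

-- last occurrence of a member
lemma pvLastIdx (cs : List Char) (x : Char) (hx : x ∈ cs) :
    ∃ L, L < cs.length ∧ cs.getD L ' ' = x ∧ x ∉ cs.drop (L + 1) := by
  induction cs with
  | nil => cases hx
  | cons y ys ih =>
    by_cases hy : x ∈ ys
    · obtain ⟨L, h1, h2, h3⟩ := ih hy
      exact ⟨L + 1, by simpa using h1, by simpa using h2, by simpa using h3⟩
    · rcases List.mem_cons.mp hx with rfl | h1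
      · exact ⟨0, by simp, by simp [List.getD], by simpa using hy⟩
      · exact absurd h1 hy

lemma pvSelLoop_spec (cs : List Char) :
    ∀ (tl : List Char) (k : Nat), tl = cs.drop k → k < cs.length →
    ∀ (cnt : PySem.Dict Char Int) (posN : Nat), posN < cs.length →
    (∀ x : Char, cnt.getD x 0 = (((cs.drop k).count x : Nat) : Int)) →
    (∀ i, i < k → cs.getD posN ' ' ≤ cs.getD i ' ') →
    (∀ i, i < posN → cs.getD posN ' ' < cs.getD i ' ') →
    posN ≤ k →
    ∃ (posR jN : Nat), jN < cs.length ∧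
      pvSelLoop cs (PySem.List.enumerate tl (k : Int)) cnt ((posN : Nat) : Int) = ((posR : Nat) : Int) ∧
      posR ≤ jN ∧ k ≤ jN ∧
      (∀ i, k ≤ i → i < jN → cs.getD i ' ' ∈ cs.drop (i + 1)) ∧
      cs.getD jN ' ' ∉ cs.drop (jN + 1) ∧
      (∀ i, i ≤ jN → cs.getD posR ' ' ≤ cs.getD i ' ') ∧
      (∀ i, i < posR → cs.getD posR ' ' < cs.getD i ' ') := by
  intro tl
  induction tl with
  | nil =>
    intro k hk hklt
    exfalso
    have h2 := congrArg List.length hk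
    simp [List.length_drop] at h2
    omega
  | cons ch tl' ih =>
    intro k hk hklt cnt posN hposlt hcnt hmin hstrict hple
    have htl' : tl' = cs.drop (k + 1) := by rw [← List.tail_drop, ← hk]; rfl
    have hdropk : cs.drop k = ch :: cs.drop (k + 1) := by rw [← hk, htl']
    have hgetk : cs.getD k ' ' = ch := by
      have h0 : cs[k]? = some ch := by
        have h1 : (cs.drop k)[0]? = some ch := by rw [hdropk]; rfl
        simpa using h1
      simp [List.getD, h0]
    rw [PySem.List.enumerate_cons]
    simp only [pvSelLoop, PySem.List.pyGetD_natCast]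
    set posN' : Nat := if ch < cs.getD posN ' ' then k else posN with hposN'
    have hpos' : (if ch < cs.getD posN ' ' then (k : Int) else ((posN : Nat) : Int))
        = ((posN' : Nat) : Int) := by
      by_cases hb : ch < cs.getD posN ' ' <;> simp [hposN', hb]
    have hcnt' : ∀ x : Char, (cnt.modify ch 0 (· - 1)).getD x 0
        = (((cs.drop (k + 1)).count x : Nat) : Int) := by
      intro x
      rw [PySem.Dict.getD_modify]
      by_cases hx : x = ch
      · subst hx
        rw [if_pos rfl, hcnt x, hdropk]
        simp [List.count_cons]
      · rw [if_neg hx, hcnt x, hdropk]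
        have : (ch == x) = false := by
          simp [Ne.symm hx]
        simp [List.count_cons, this]
    have hposN'lt : posN' < cs.length := by
      rw [hposN']; split <;> omega
    have hple' : posN' ≤ k + 1 := by
      rw [hposN']; split <;> omega
    have hmin' : ∀ i, i < k + 1 → cs.getD posN' ' ' ≤ cs.getD i ' ' := by
      intro i hi
      by_cases hb : ch < cs.getD posN ' '
      · have hp : posN' = k := by rw [hposN', if_pos hb]
        rw [hp, hgetk]
        rcases Nat.lt_succ_iff_lt_or_eq.mp hi with h1 | rfl
        · exact le_of_lt (lt_of_lt_of_le hb (hmin i h1))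
        · rw [hgetk]
      · have hp : posN' = posN := by rw [hposN', if_neg hb]
        rw [hp]
        rcases Nat.lt_succ_iff_lt_or_eq.mp hi with h1 | rfl
        · exact hmin i h1
        · rw [hgetk]; exact le_of_not_gt hb
    have hstrict' : ∀ i, i < posN' → cs.getD posN' ' ' < cs.getD i ' ' := by
      intro i hi
      by_cases hb : ch < cs.getD posN ' '
      · have hp : posN' = k := by rw [hposN', if_pos hb]
        rw [hp] at hi ⊢
        rw [hgetk]
        exact lt_of_lt_of_le hb (hmin i hi)
      · have hp : posN' = posN := by rw [hposN', if_neg hb]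
        rw [hp] at hi ⊢
        exact hstrict i hi
    rw [hpos']
    by_cases hbreak : (cnt.modify ch 0 (· - 1)).getD ch 0 = 0
    · have hnotin : ch ∉ cs.drop (k + 1) := by
        rw [hcnt' ch] at hbreak
        have : (cs.drop (k + 1)).count ch = 0 := by exact_mod_cast hbreak
        exact (List.count_eq_zero).mp this
      rw [if_pos hbreak]
      refine ⟨posN', k, hklt, rfl, by omega, le_rfl, ?_, ?_, ?_, hstrict'⟩
      · intro i h1 h2; omega
      · rw [hgetk]; exact hnotin
      · intro i hi; exact hmin' i (by omega)
    · have hin : ch ∈ cs.drop (k + 1) := by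
        by_contra hno
        apply hbreak
        rw [hcnt' ch]
        have : (cs.drop (k + 1)).count ch = 0 := List.count_eq_zero.mpr hno
        simp [this]
      have hk1lt : k + 1 < cs.length := by
        have hne : cs.drop (k + 1) ≠ [] := List.ne_nil_of_mem hin
        have := List.length_pos_iff.mpr hne
        simp [List.length_drop] at this
        omega
      rw [if_neg hbreak]
      have hc1 : (k : Int) + 1 = ((k + 1 : Nat) : Int) := by push_cast; ring
      rw [hc1]
      obtain ⟨posR, jN, hj, heq, hpj, hkj, J2, J3, P2, P3⟩ :=
        ih (k + 1) htl' hk1lt (cnt.modify ch 0 (· - 1)) posN' hposN'lt hcnt' hmin' hstrict' hple'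
      refine ⟨posR, jN, hj, heq, hpj, by omega, ?_, J3, P2, P3⟩
      intro i h1 h2
      rcases Nat.eq_or_lt_of_le h1 with rfl | h3
      · rw [hgetk]; exact hin
      · exact J2 i h3 h2

-- derive the structural facts used by pvG_select from the loop's outcome
lemma pvMemDrop_mono (cs : List Char) (a b : Nat) (hab : a ≤ b) (x : Char)
    (hx : x ∈ cs.drop b) : x ∈ cs.drop a := by
  have h : cs.drop b = (cs.drop a).drop (b - a) := by
    rw [List.drop_drop]
    congr 1
    omega
  rw [h] at hx
  exact List.mem_of_mem_drop hx

lemma pvGetD_eq (cs : List Char) (i : Nat) (h : i < cs.length) : cs.getD i ' ' = cs[i] :=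
  List.getD_eq_getElem cs ' ' h

lemma pvSel_props (cs : List Char) (posR jN : Nat) (hj : jN < cs.length) (hpj : posR ≤ jN)
    (J2 : ∀ i, i < jN → cs.getD i ' ' ∈ cs.drop (i + 1))
    (J3 : cs.getD jN ' ' ∉ cs.drop (jN + 1))
    (P2 : ∀ i, i ≤ jN → cs.getD posR ' ' ≤ cs.getD i ' ')
    (P3 : ∀ i, i < posR → cs.getD posR ' ' < cs.getD i ' ') :
    (∀ x ∈ cs.take posR, cs.getD posR ' ' < x ∧ x ∈ cs.drop (posR + 1)) ∧
      pvInv (cs.getD posR ' ') [] (cs.drop (posR + 1)) := by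
  have hposlt : posR < cs.length := Nat.lt_of_le_of_lt hpj hj
  constructor
  · intro x hx
    obtain ⟨i, hi, hxe⟩ := List.mem_iff_getElem.mp hx
    have hipos : i < posR := by
      simp [List.length_take] at hi
      omega
    have hilen : i < cs.length := Nat.lt_of_lt_of_le hipos (le_of_lt hposlt)
    have hxi : cs.getD i ' ' = x := by
      rw [pvGetD_eq cs i hilen, ← hxe]
      simp
    constructor
    · rw [← hxi]; exact P3 i hipos
    · have hxmem : x ∈ cs := List.mem_of_mem_take hx
      obtain ⟨L, hL1, hL2, hL3⟩ := pvLastIdx cs x hxmem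
      have hLj : jN ≤ L := by
        by_contra hlt
        push_neg at hlt
        exact hL3 (hL2 ▸ J2 L hlt)
      have hLne : L ≠ posR := by
        intro he
        have hlt : cs.getD posR ' ' < x := hxi ▸ P3 i hipos
        rw [← he, hL2] at hlt
        exact lt_irrefl x hlt
      have hLgt : posR < L := by omega
      have hsub : L - (posR + 1) < (cs.drop (posR + 1)).length := by
        simp [List.length_drop]
        omega
      have hval : (cs.drop (posR + 1))[L - (posR + 1)]'hsub = x := by
        rw [List.getElem_drop]
        rw [← pvGetD_eq cs (posR + 1 + (L - (posR + 1))) (by omega)]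
        have heq : posR + 1 + (L - (posR + 1)) = L := by omega
        rw [heq]
        exact hL2
      exact hval ▸ List.getElem_mem hsub
  · intro r1 d r2 hsplit hd hc2
    have hjgt : posR < jN := by
      rcases Nat.lt_or_ge posR jN with h | h
      · exact h
      · have he : posR = jN := by omega
        exfalso
        apply J3
        rw [← he, hsplit]
        simp only [List.mem_append, List.mem_cons]
        exact Or.inr (Or.inr hc2)
    have hlen1 : cs.length - (posR + 1) = r1.length + (r2.length + 1) := by
      have := congrArg List.length hsplit
      simpa using this
    have hidxlt : posR + 1 + r1.length < cs.length := by omega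
    have hdr : cs.drop (posR + 1 + r1.length) = d :: r2 := by
      have h1 : (cs.drop (posR + 1)).drop r1.length = d :: r2 := by
        rw [hsplit, List.drop_left]
      rw [List.drop_drop] at h1
      exact h1
    have hdval : cs.getD (posR + 1 + r1.length) ' ' = d := by
      have h0 : cs[posR + 1 + r1.length]? = some d := by
        have h1 : (cs.drop (posR + 1 + r1.length))[0]? = some d := by rw [hdr]; rfl
        simpa using h1
      simp [List.getD, h0]
    have hjidx : jN < posR + 1 + r1.length := by
      by_contra h
      push_neg at h
      have hle := P2 (posR + 1 + r1.length) h
      rw [hdval] at hle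
      exact absurd hd (not_lt.mpr hle)
    have hnotin_tail : cs.getD jN ' ' ∉ d :: r2 := by
      intro hmem
      apply J3
      rw [← hdr] at hmem
      exact pvMemDrop_mono cs (jN + 1) (posR + 1 + r1.length) (by omega) _ hmem
    refine ⟨cs.getD jN ' ', ?_, Or.inr ?_, hnotin_tail⟩
    · intro he
      apply J3
      rw [he]
      have : cs.getD posR ' ' ∈ d :: r2 := List.mem_cons_of_mem _ hc2
      rw [← hdr] at this
      exact pvMemDrop_mono cs (jN + 1) (posR + 1 + r1.length) (by omega) _ this
    · have hsub2 : jN - (posR + 1) < r1.length := by omega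
      have hsub3 : jN - (posR + 1) < (cs.drop (posR + 1)).length := by
        simp [List.length_drop]; omega
      have hval2 : (cs.drop (posR + 1))[jN - (posR + 1)]'hsub3 = cs.getD jN ' ' := by
        rw [List.getElem_drop]
        rw [← pvGetD_eq cs (posR + 1 + (jN - (posR + 1))) (by omega)]
        congr 1
        omega
      have h5 : (r1 ++ d :: r2)[jN - (posR + 1)]? = some (cs.getD jN ' ') := by
        rw [← hsplit, List.getElem?_eq_getElem hsub3, hval2]
      rw [List.getElem?_append_left hsub2] at h5
      exact List.mem_of_getElem? h5

lemma pvSel_eq_pvG : ∀ (n : Nat) (cs : List Char), cs.length ≤ n →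
    pvSel cs = (pvG [] cs).reverse := by
  intro n
  induction n with
  | zero =>
    intro cs hlen
    have hnil : cs = [] := List.eq_nil_of_length_eq_zero (Nat.le_zero.mp hlen)
    subst hnil
    rw [pvSel]
    simp [pvG]
  | succ n ih =>
    intro cs hlen
    by_cases hcs : cs = []
    · subst hcs
      rw [pvSel]
      simp [pvG]
    · have hlen0 : 0 < cs.length := List.length_pos_iff.mpr hcs
      have hcount : ∀ x : Char, (pvCount cs).getD x 0 = (((cs.drop 0).count x : Nat) : Int) := by
        intro x
        unfold pvCount
        rw [PySem.Dict.foldl_insert_getD_add_one_eq_counter, PySem.Dict.getD_counter]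
        simp
      obtain ⟨posR, jN, hj, heq, hpj, _, J2, J3, P2, P3⟩ :=
        pvSelLoop_spec cs cs 0 (by simp) hlen0 (pvCount cs) 0 hlen0 hcount
          (fun i hi => absurd hi (Nat.not_lt_zero i))
          (fun i hi => absurd hi (Nat.not_lt_zero i)) (Nat.le_refl 0)
      have hR : pvSelPos cs = ((posR : Nat) : Int) := by
        unfold pvSelPos
        simpa using heq
      have hposlt : posR < cs.length := Nat.lt_of_le_of_lt hpj hj
      set c := cs.getD posR ' ' with hc
      obtain ⟨F1, F2⟩ := pvSel_props cs posR jN hj hpj (fun i hi => J2 i (Nat.zero_le i) hi)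
        J3 P2 P3
      have hdecomp : cs = cs.take posR ++ c :: cs.drop (posR + 1) := by
        conv_lhs => rw [← List.take_append_drop posR cs]
        congr 1
        rw [List.drop_eq_getElem_cons hposlt]
        congr 1
        rw [hc, pvGetD_eq cs posR hposlt]
      have hkey := pvG_select c (cs.take posR) (cs.drop (posR + 1)) F1 F2
      have hgetc : PySem.List.pyGetD cs (pvSelPos cs) ' ' = c := by
        rw [hR, PySem.List.pyGetD_natCast, hc]
      have hslice2 : PySem.List.slice cs (some (pvSelPos cs + 1)) none = cs.drop (posR + 1) := by
        rw [hR, show ((posR : Int) + 1) = ((posR + 1 : Nat) : Int) by push_cast; ring]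
        rw [PySem.List.slice_from_natCast]
      have hunfold : pvSel cs
          = PySem.List.pyGetD cs (pvSelPos cs) ' '
            :: pvSel ((PySem.List.slice cs (some (pvSelPos cs + 1)) none).filter
                (fun ch => ch ≠ PySem.List.pyGetD cs (pvSelPos cs) ' ')) := by
        conv_lhs => rw [pvSel]
        simp only [dif_neg hcs]
      rw [hunfold, hgetc, hslice2]
      have hrest : ((cs.drop (posR + 1)).filter (fun ch => ch ≠ c)).length ≤ n := by
        have h1 := List.length_filter_le (fun ch => decide (ch ≠ c)) (cs.drop (posR + 1))
        simp only [List.length_drop] at h1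
        omega
      rw [ih _ hrest]
      conv_rhs => rw [hdecomp]
      rw [hkey]
      simp

-- ===== final assembly =====

-- ===== VERDICT (by name: the statement is the Claim_ definition above) =====
theorem removeDuplicateLetters4_spec : Claim_equal_removeDuplicateLetters4 := by
  intro s _
  unfold Spec_removeDuplicateLetters4 removeDuplicateLetters4 removeDuplicateLetters4_alt
  have hA := pvAmain s.toList s.toList 0 (by simp) []
  simp only [Nat.cast_zero, List.reverse_nil] at hA
  rw [pvSel_eq_pvG s.toList.length s.toList le_rfl]
  exact congrArg String.mk hA
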